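-- pv_equiv track=rewrite | github.com/HBinhCT/Q-project | hackerearth/Algorithms/Maximum Inequality/solution.py | solve
-- ===== SOURCE A (Python) =====
-- def solve(N, S):
--     # Write your code here
--     s1 = ''
--     s2 = ''
--     for c in S:
--         if s1 == '':
--             s1 += c
--         elif s1[-1] != c:
--             s1 += c
--         elif s2 == '':
--             s2 += c
--         elif s2[-1] != c:
--             s2 += c
--     return len(s1) + len(s2) - 1 - (s2 != '')
-- ===== SOURCE B (Python) =====
-- def solve(N, S):
--     # Run-length encode S, then count runs plus distinct-from-previous long runs.
--     runs = []
--     for c in S: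
--         if runs and runs[-1][0] == c:
--             runs[-1][1] += 1
--         else:
--             runs.append([c, 1])
--     R = len(runs)
--     L = 0
--     prev = None
--     for ch, n in runs:
--         if n >= 2 and ch != prev:
--             L += 1
--             prev = ch
--     return R + L - 1 - (1 if L else 0)
-- ===== Notes on version B (the rewrite author's own statement) =====
-- stated objective: alternative
-- what changed: Replaces the char-by-char two-string-buffer greedy simulation with a run-length encoding of S followed by a single pass counting runs and length->=2 runs whose character differs from the previously counted one, combined arithmetically.
import Mathlib
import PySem

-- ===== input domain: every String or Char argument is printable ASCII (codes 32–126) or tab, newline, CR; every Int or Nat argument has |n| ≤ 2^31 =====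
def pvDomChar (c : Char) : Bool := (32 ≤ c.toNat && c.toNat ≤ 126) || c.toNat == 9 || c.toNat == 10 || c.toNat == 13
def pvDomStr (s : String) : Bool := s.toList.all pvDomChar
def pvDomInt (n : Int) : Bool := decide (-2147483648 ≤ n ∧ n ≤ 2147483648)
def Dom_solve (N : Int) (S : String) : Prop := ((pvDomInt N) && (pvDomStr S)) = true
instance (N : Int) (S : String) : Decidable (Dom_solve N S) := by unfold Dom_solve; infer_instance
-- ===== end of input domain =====

-- B replaces A's char-by-char two-buffer greedy simulation by run-length encoding
-- followed by a count over the runs (objective: alternative decomposition, same cost).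

-- ===== PORT A =====
-- one iteration of A's loop over the state (s1, s2)
def stepA (st : List Char × List Char) (c : Char) : List Char × List Char :=
  if st.1 = [] then (st.1 ++ [c], st.2)
  else if st.1.getLast? ≠ some c then (st.1 ++ [c], st.2)
  else if st.2 = [] then (st.1, st.2 ++ [c])
  else if st.2.getLast? ≠ some c then (st.1, st.2 ++ [c])
  else st

def solve (N : Int) (S : String) : Int :=
  let st := S.toList.foldl stepA ([], [])
  (st.1.length : Int) + (st.2.length : Int) - 1 - (if st.2 ≠ [] then 1 else 0)

-- ===== PORT B =====
-- one iteration of B's run-length-encoding loop (runs[-1][1] += 1 / runs.append([c, 1]))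
def stepRuns (runs : List (Char × Int)) (c : Char) : List (Char × Int) :=
  match runs.getLast? with
  | some (ch, n) => if ch = c then runs.dropLast ++ [(ch, n + 1)] else runs ++ [(c, 1)]
  | none => [(c, 1)]

-- one iteration of B's second loop over the runs, state = (L, prev)
def stepL (st : Int × Option Char) (r : Char × Int) : Int × Option Char :=
  if r.2 ≥ 2 ∧ st.2 ≠ some r.1 then (st.1 + 1, some r.1) else st

def solve_alt (N : Int) (S : String) : Int :=
  let runs := S.toList.foldl stepRuns []
  let R : Int := runs.length
  let lp := runs.foldl stepL (0, none)
  R + lp.1 - 1 - (if lp.1 ≠ 0 then 1 else 0)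

-- ===== PRECONDITION & SPEC =====
def Spec_solve (N : Int) (S : String) (out : Int) : Prop := out = solve_alt N S
instance (N : Int) (S : String) (out : Int) : Decidable (Spec_solve N S out) := by unfold Spec_solve; infer_instance

-- ===== CLAIM (what is proved, stated in full; the proofs are below) =====
def Claim_equal_solve : Prop := ∀ (N : Int) (S : String), Dom_solve N S → Spec_solve N S (solve N S)

-- ===== LEMMAS AND PROOFS =====

-- invariant linking A's two buffers to B's run list
def InvAB (rs : List (Char × Int)) (st : List Char × List Char) : Prop :=
  st.1 = rs.map Prod.fst ∧ (∀ r ∈ rs, 1 ≤ r.2) ∧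
  ((st.2.length : Int), st.2.getLast?) = rs.foldl stepL (0, none)

lemma inv_step (rs : List (Char × Int)) (st : List Char × List Char) (c : Char)
    (h : InvAB rs st) : InvAB (stepRuns rs c) (stepA st c) := by
  obtain ⟨h1, hcnt, h2⟩ := h
  rcases hlast : rs.getLast? with _ | ⟨ch, n⟩
  · -- rs = [] : start a new (first) run, A appends to empty s1
    have hrs : rs = [] := List.getLast?_eq_none_iff.mp hlast
    subst hrs
    simp only [List.map_nil] at h1
    have hs2 : st.2 = [] := by simpa [List.foldl] using h2
    refine ⟨?_, ?_, ?_⟩ <;> simp [stepRuns, stepA, h1, hs2, stepL]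
  · -- rs = q ++ [(ch, n)]
    have hne : rs ≠ [] := by intro hh; simp [hh] at hlast
    have hdecomp : rs.dropLast ++ [(ch, n)] = rs := by
      have := List.dropLast_concat_getLast hne
      rwa [List.getLast_eq_iff_getLast?_eq_some hne |>.mpr hlast] at this
    set q := rs.dropLast with hq
    obtain ⟨L₀, p₀, hfq⟩ : ∃ L p, q.foldl stepL (0, none) = (L, p) :=
      ⟨_, _, rfl⟩
    have hfold : rs.foldl stepL (0, none) = stepL (L₀, p₀) (ch, n) := by
      rw [← hdecomp, List.foldl_append, hfq]; rfl
    have hs1last : st.1.getLast? = some ch := by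
      rw [h1, ← hdecomp]; simp
    have hs1ne : st.1 ≠ [] := by
      intro hh; rw [hh] at hs1last; simp at hs1last
    have hn1 : 1 ≤ n := hcnt (ch, n) (by rw [← hdecomp]; simp)
    by_cases hc : ch = c
    · -- increment the last run
      subst hc
      have hsteprs : stepRuns rs ch = q ++ [(ch, n + 1)] := by
        simp [stepRuns, hlast, hq]
      have hmap : (q ++ [(ch, n + 1)]).map Prod.fst = rs.map Prod.fst := by
        rw [← hdecomp]; simp
      have hcnt' : ∀ r ∈ q ++ [(ch, n + 1)], 1 ≤ r.2 := by
        intro r hr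
        rcases List.mem_append.mp hr with hr | hr
        · exact hcnt r (by rw [← hdecomp]; exact List.mem_append_left _ hr)
        · simp at hr; subst hr; omega
      have hfold' : (q ++ [(ch, n + 1)]).foldl stepL (0, none)
          = stepL (L₀, p₀) (ch, n + 1) := by
        rw [List.foldl_append, hfq]; rfl
      -- A's s2 pair equals stepL (L₀,p₀) (ch,n)
      have hpair : ((st.2.length : Int), st.2.getLast?) = stepL (L₀, p₀) (ch, n) := by
        rw [h2, hfold]
      by_cases hp : p₀ = some ch
      · -- nothing changes on either side
        have hstep : stepL (L₀, p₀) (ch, n) = (L₀, p₀) := by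
          simp [stepL, hp]
        have hs2last : st.2.getLast? = some ch := by
          have := congrArg Prod.snd hpair
          rw [hstep] at this
          simpa [hp] using this
        have hs2ne : st.2 ≠ [] := by
          intro hh; rw [hh] at hs2last; simp at hs2last
        have hA : stepA st ch = st := by
          simp [stepA, hs1ne, hs1last, hs2ne, hs2last]
        refine ⟨?_, ?_, ?_⟩
        · rw [hA, hsteprs, hmap, h1]
        · rw [hsteprs]; exact hcnt'
        · rw [hA, hsteprs, hfold']
          have hst' : stepL (L₀, p₀) (ch, n + 1) = (L₀, p₀) := by
            simp [stepL, hp]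
          rw [hst', hpair, hstep]
      · by_cases hn2 : 2 ≤ n
        · -- long run already counted: both sides unchanged
          have hstep : stepL (L₀, p₀) (ch, n) = (L₀ + 1, some ch) := by
            simp [stepL, hn2, hp]
          have hs2last : st.2.getLast? = some ch := by
            have := congrArg Prod.snd hpair; simpa [hstep] using this
          have hs2ne : st.2 ≠ [] := by
            intro hh; rw [hh] at hs2last; simp at hs2last
          have hA : stepA st ch = st := by
            simp [stepA, hs1ne, hs1last, hs2ne, hs2last]
          refine ⟨?_, ?_, ?_⟩
          · rw [hA, hsteprs, hmap, h1]
          · rw [hsteprs]; exact hcnt'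
          · rw [hA, hsteprs, hfold']
            have : stepL (L₀, p₀) (ch, n + 1) = (L₀ + 1, some ch) := by
              simp [stepL, hp]; omega
            rw [this, hpair, hstep]
        · -- run becomes length 2: A appends to s2, B's count gains one
          have hn : n = 1 := by omega
          subst hn
          have hstep : stepL (L₀, p₀) (ch, 1) = (L₀, p₀) := by
            simp [stepL]
          have hs2last : st.2.getLast? = p₀ := by
            have := congrArg Prod.snd hpair; simpa [hstep] using this
          have hA : stepA st ch = (st.1, st.2 ++ [ch]) := by
            by_cases hs2e : st.2 = []
            · simp [stepA, hs1ne, hs1last, hs2e]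
            · have : st.2.getLast? ≠ some ch := by rw [hs2last]; exact hp
              simp [stepA, hs1ne, hs1last, hs2e, this]
          refine ⟨?_, ?_, ?_⟩
          · rw [hA, hsteprs, hmap, h1]
          · rw [hsteprs]; exact hcnt'
          · rw [hA, hsteprs, hfold']
            have hL : (st.2.length : Int) = L₀ := by
              have := congrArg Prod.fst hpair; simpa [hstep] using this
            have : stepL (L₀, p₀) (ch, 1 + 1) = (L₀ + 1, some ch) := by
              simp [stepL, hp]
            rw [this]
            simp
            omega
    · -- new run: A appends to s1, B appends a fresh run
      have hsteprs : stepRuns rs c = rs ++ [(c, 1)] := by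
        simp [stepRuns, hlast, hc]
      have hA : stepA st c = (st.1 ++ [c], st.2) := by
        have : st.1.getLast? ≠ some c := by
          rw [hs1last]; simpa using hc
        simp [stepA, hs1ne, this]
      refine ⟨?_, ?_, ?_⟩
      · rw [hA, hsteprs]; simp [h1]
      · rw [hsteprs]; intro r hr
        rcases List.mem_append.mp hr with hr | hr
        · exact hcnt r hr
        · simp at hr; subst hr; omega
      · rw [hA, hsteprs, List.foldl_append]
        simp only [List.foldl]
        rw [← h2]
        simp [stepL]

lemma inv_all (cs : List Char) : InvAB (cs.foldl stepRuns []) (cs.foldl stepA ([], [])) := by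
  induction cs using List.reverseRecOn with
  | nil => exact ⟨by simp, by simp, by simp⟩
  | append_singleton cs c ih =>
      rw [List.foldl_append, List.foldl_append]
      exact inv_step _ _ c ih

-- ===== VERDICT (by name: the statement is the Claim_ definition above) =====
theorem solve_spec : Claim_equal_solve := by
  intro N S _
  unfold Spec_solve solve solve_alt
  obtain ⟨h1, _, h2⟩ := inv_all S.toList
  set rs := S.toList.foldl stepRuns []
  set st := S.toList.foldl stepA ([], [])
  obtain ⟨L, p, hf⟩ : ∃ L p, rs.foldl stepL (0, none) = (L, p) := ⟨_, _, rfl⟩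
  rw [hf] at h2
  have hL : (st.2.length : Int) = L := congrArg Prod.fst h2
  have hlen : st.1.length = rs.length := by rw [h1]; simp
  have hemp : (st.2 ≠ []) ↔ (L ≠ 0) := by
    rw [← hL]
    constructor
    · intro h hh
      exact h (List.length_eq_zero_iff.mp (by exact_mod_cast hh))
    · intro h hh
      exact h (by simp [hh])
  simp only [hf]
  rw [hlen, hL]
  by_cases hs : st.2 = []
  · have hL0 : L = 0 := by rw [← hL, hs]; simp
    simp [hs, hL0]
  · simp [hs, hemp.mp hs]
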